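-- pv_equiv track=rewrite | github.com/brendanlynch9/Wdamm-FLOB2 | EulerBrick/newEuclid3.py | two_triples_generator
-- ===== SOURCE A (Python) =====
-- import math
-- from typing import Generator, Tuple
--
-- def two_triples_generator(max_m: int) -> Generator[Tuple[int, int, int], None, None]:
--     for m1 in range(2, min(25, max_m + 1)):
--         for n1 in range(1, m1):
--             if math.gcd(m1, n1) != 1 or (m1 + n1) % 2 != 1: continue
--             u1 = m1*m1 - n1*n1; v1 = 2*m1*n1
--             for m2 in range(2, min(25, max_m + 1)):
--                 for n2 in range(1, m2):
--                     if math.gcd(m2, n2) != 1 or (m2 + n2) % 2 != 1: continue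
--                     u2 = m2*m2 - n2*n2; v2 = 2*m2*n2
--                     lcm = math.lcm(u1, u2, v1, v2)
--                     yield lcm*u1, lcm*v1, lcm*u2
-- ===== SOURCE B (Python) =====
-- import math
--
-- _BOUND = 25
--
-- def _euclid_pairs():
--     # Berggren/Barning tree: starting from (2, 1), the three branches below generate
--     # every (m, n) with m > n >= 1, gcd(m, n) == 1, m + n odd, each exactly once.
--     # DFS with an explicit stack, pruned at m >= _BOUND.
--     stack = [(2, 1)]
--     found = []
--     while stack:
--         m, n = stack.pop()
--         if m < _BOUND:
--             found.append((m, n))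
--             stack.append((2*m - n, m))
--             stack.append((2*m + n, m))
--             stack.append((m + 2*n, n))
--     return found
--
-- def two_triples_generator(max_m):
--     k = min(_BOUND, max_m + 1)
--     pairs = sorted(p for p in _euclid_pairs() if p[0] < k)
--     uv = [(m*m - n*n, 2*m*n) for (m, n) in pairs]
--     for u1, v1 in uv:
--         for u2, v2 in uv:
--             l = math.lcm(u1, u2, v1, v2)
--             yield l*u1, l*v1, l*u2
-- ===== Notes on version B (the rewrite author's own statement) =====
-- stated objective: alternative
-- what changed: B replaces A's gcd/parity-filtered nested range scans entirely: it generates the valid Euclid (m,n) parameters by a stack-driven Berggren coprime-tree walk (no gcd computations at all), sorts them to recover A's (m,n) order, and then combines pairs with one plain double loop instead of re-running the filtered scan inside every outer iteration.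
import Mathlib
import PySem

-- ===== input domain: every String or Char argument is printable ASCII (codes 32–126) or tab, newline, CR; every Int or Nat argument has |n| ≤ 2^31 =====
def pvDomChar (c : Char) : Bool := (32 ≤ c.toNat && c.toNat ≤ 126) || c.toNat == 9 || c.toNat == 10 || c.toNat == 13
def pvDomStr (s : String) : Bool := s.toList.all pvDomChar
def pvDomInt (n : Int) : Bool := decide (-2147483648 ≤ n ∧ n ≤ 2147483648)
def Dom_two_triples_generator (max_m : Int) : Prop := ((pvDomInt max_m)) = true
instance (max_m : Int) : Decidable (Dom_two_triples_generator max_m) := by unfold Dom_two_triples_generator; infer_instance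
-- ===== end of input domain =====

-- B generates the Euclid (m,n) parameters by the Berggren coprime tree (no gcd tests) and sorts
-- them, instead of A's gcd/parity-filtered nested range scan re-run inside every outer iteration.

-- math.lcm on ints (nonnegative result), exact
def pyLcm (a b : Int) : Int := (Int.lcm a b : Int)

-- ===== PORT A =====
def two_triples_generator (max_m : Int) : List (Int × Int × Int) :=
  (PySem.List.pyRange 2 (min 25 (max_m + 1)) 1).foldl (fun acc m1 =>
    (PySem.List.pyRange 1 m1 1).foldl (fun acc n1 =>
      if Int.gcd m1 n1 ≠ 1 ∨ PySem.Int.mod (m1 + n1) 2 ≠ 1 then acc else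
      let u1 := m1 * m1 - n1 * n1
      let v1 := 2 * m1 * n1
      (PySem.List.pyRange 2 (min 25 (max_m + 1)) 1).foldl (fun acc m2 =>
        (PySem.List.pyRange 1 m2 1).foldl (fun acc n2 =>
          if Int.gcd m2 n2 ≠ 1 ∨ PySem.Int.mod (m2 + n2) 2 ≠ 1 then acc else
          let u2 := m2 * m2 - n2 * n2
          let v2 := 2 * m2 * n2
          let lcm := pyLcm (pyLcm (pyLcm u1 u2) v1) v2
          acc ++ [(lcm * u1, lcm * v1, lcm * u2)]) acc) acc) acc) []

-- ===== PORT B =====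
-- the stack-driven tree walk of Source B's _euclid_pairs; the Lean list's HEAD is the Python
-- stack's top (Python pops/pushes at the end), so the three pushes appear in reverse order;
-- the fuel (400) exceeds the walk's 364 loop iterations, so it never cuts the computation
def treeLoop : Nat → List (Int × Int) → List (Int × Int) → List (Int × Int)
  | 0, _, found => found
  | _ + 1, [], found => found
  | fuel + 1, (m, n) :: rest, found =>
      if m < 25 then
        treeLoop fuel ((m + 2*n, n) :: (2*m + n, m) :: (2*m - n, m) :: rest) (found ++ [(m, n)])
      else treeLoop fuel rest found

def two_triples_generator_alt (max_m : Int) : List (Int × Int × Int) :=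
  let k := min 25 (max_m + 1)
  let pairs := PySem.List.sorted2
    ((treeLoop 400 [(2, 1)] []).filter (fun p => decide (p.1 < k))) (fun p => p.1) (fun p => p.2)
  let uv := pairs.map (fun p => (p.1 * p.1 - p.2 * p.2, 2 * p.1 * p.2))
  uv.flatMap (fun p1 =>
    uv.map (fun p2 =>
      let l := pyLcm (pyLcm (pyLcm p1.1 p2.1) p1.2) p2.2
      (l * p1.1, l * p1.2, l * p2.1)))

-- ===== PRECONDITION & SPEC =====
def Spec_two_triples_generator (max_m : Int) (out : List (Int × Int × Int)) : Prop := out = two_triples_generator_alt max_m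
instance (max_m : Int) (out : List (Int × Int × Int)) : Decidable (Spec_two_triples_generator max_m out) := by unfold Spec_two_triples_generator; infer_instance

-- ===== CLAIM (what is proved, stated in full; the proofs are below) =====
def Claim_equal_two_triples_generator : Prop := ∀ (max_m : Int), Dom_two_triples_generator max_m → Spec_two_triples_generator max_m (two_triples_generator max_m)

-- ===== LEMMAS AND PROOFS =====

-- the (m, n) parameters A's filtered scan keeps, in its (m, n) order
def mnPairs (k : Int) : List (Int × Int) :=
  (PySem.List.pyRange 2 k 1).flatMap (fun m =>
    ((PySem.List.pyRange 1 m 1).filter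
        (fun n => decide (¬ (Int.gcd m n ≠ 1 ∨ PySem.Int.mod (m + n) 2 ≠ 1)))).map
      (fun n => (m, n)))

-- the (u, v) = (m²-n², 2mn) values of those parameters, A's yield order
def euclidPairs (k : Int) : List (Int × Int) :=
  (PySem.List.pyRange 2 k 1).flatMap (fun m =>
    ((PySem.List.pyRange 1 m 1).filter
        (fun n => decide (¬ (Int.gcd m n ≠ 1 ∨ PySem.Int.mod (m + n) 2 ≠ 1)))).map
      (fun n => (m * m - n * n, 2 * m * n)))

theorem euclidPairs_eq_map (k : Int) :
    euclidPairs k = (mnPairs k).map (fun p => (p.1 * p.1 - p.2 * p.2, 2 * p.1 * p.2)) := by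
  simp [euclidPairs, mnPairs, List.map_flatMap, List.map_map, Function.comp_def]

-- 'if c then acc else acc ++ g n'-fold = append of flatMap over the kept elements
theorem foldl_skip_append {α : Type} (c : Int → Prop) [DecidablePred c] (g : Int → List α) :
    ∀ (l : List Int) (acc : List α),
      l.foldl (fun a n => if c n then a else a ++ g n) acc
        = acc ++ (l.filter (fun n => decide (¬ c n))).flatMap g := by
  intro l
  induction l with
  | nil => intro acc; simp
  | cons x xs ih =>
    intro acc
    by_cases hx : c x <;>
      simp [List.foldl_cons, hx, ih, List.append_assoc]

-- the generic double loop of A's shape, as a flatMap over euclidPairs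
theorem dloop {α : Type} (k : Int) (g : Int × Int → List α) (acc : List α) :
    (PySem.List.pyRange 2 k 1).foldl (fun acc m =>
        (PySem.List.pyRange 1 m 1).foldl (fun acc n =>
          if Int.gcd m n ≠ 1 ∨ PySem.Int.mod (m + n) 2 ≠ 1 then acc
          else acc ++ g (m * m - n * n, 2 * m * n)) acc) acc
      = acc ++ (euclidPairs k).flatMap g := by
  have hinner : ∀ (m : Int) (a : List α),
      (PySem.List.pyRange 1 m 1).foldl (fun acc n =>
          if Int.gcd m n ≠ 1 ∨ PySem.Int.mod (m + n) 2 ≠ 1 then acc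
          else acc ++ g (m * m - n * n, 2 * m * n)) a
        = a ++ ((PySem.List.pyRange 1 m 1).filter
              (fun n => decide (¬ (Int.gcd m n ≠ 1 ∨ PySem.Int.mod (m + n) 2 ≠ 1)))).flatMap
            (fun n => g (m * m - n * n, 2 * m * n)) := by
    intro m a
    exact foldl_skip_append (fun n => Int.gcd m n ≠ 1 ∨ PySem.Int.mod (m + n) 2 ≠ 1)
      (fun n => g (m * m - n * n, 2 * m * n)) _ a
  calc (PySem.List.pyRange 2 k 1).foldl (fun acc m =>
          (PySem.List.pyRange 1 m 1).foldl (fun acc n =>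
            if Int.gcd m n ≠ 1 ∨ PySem.Int.mod (m + n) 2 ≠ 1 then acc
            else acc ++ g (m * m - n * n, 2 * m * n)) acc) acc
      = (PySem.List.pyRange 2 k 1).foldl (fun acc m =>
          acc ++ ((PySem.List.pyRange 1 m 1).filter
              (fun n => decide (¬ (Int.gcd m n ≠ 1 ∨ PySem.Int.mod (m + n) 2 ≠ 1)))).flatMap
            (fun n => g (m * m - n * n, 2 * m * n))) acc := by
        refine PySem.List.foldl_congr_mem _ _ _ _ ?_
        intro a m _
        exact hinner m a
    _ = acc ++ (euclidPairs k).flatMap g := by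
        rw [PySem.List.foldl_append_eq_flatMap]
        simp only [euclidPairs, List.flatMap_assoc, List.flatMap_map]

-- A in flatMap-over-pairs form
theorem portA_eq (max_m : Int) :
    two_triples_generator max_m
      = (euclidPairs (min 25 (max_m + 1))).flatMap (fun p1 =>
          (euclidPairs (min 25 (max_m + 1))).flatMap (fun p2 =>
            [ (let lcm := pyLcm (pyLcm (pyLcm p1.1 p2.1) p1.2) p2.2
               (lcm * p1.1, lcm * p1.2, lcm * p2.1)) ])) := by
  unfold two_triples_generator
  have h1 : ∀ (p1 : Int × Int) (acc : List (Int × Int × Int)),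
      (PySem.List.pyRange 2 (min 25 (max_m + 1)) 1).foldl (fun acc m2 =>
        (PySem.List.pyRange 1 m2 1).foldl (fun acc n2 =>
          if Int.gcd m2 n2 ≠ 1 ∨ PySem.Int.mod (m2 + n2) 2 ≠ 1 then acc else
          acc ++ [(let lcm := pyLcm (pyLcm (pyLcm p1.1 (m2*m2-n2*n2)) p1.2) (2*m2*n2)
                   (lcm * p1.1, lcm * p1.2, lcm * (m2*m2-n2*n2)))]) acc) acc
      = acc ++ (euclidPairs (min 25 (max_m + 1))).flatMap (fun p2 =>
          [ (let lcm := pyLcm (pyLcm (pyLcm p1.1 p2.1) p1.2) p2.2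
             (lcm * p1.1, lcm * p1.2, lcm * p2.1)) ]) := by
    intro p1 acc
    exact dloop (min 25 (max_m + 1))
      (fun p2 => [ (let lcm := pyLcm (pyLcm (pyLcm p1.1 p2.1) p1.2) p2.2
                    (lcm * p1.1, lcm * p1.2, lcm * p2.1)) ]) acc
  have := dloop (k := min 25 (max_m + 1))
    (g := fun p1 => (euclidPairs (min 25 (max_m + 1))).flatMap (fun p2 =>
      [ (let lcm := pyLcm (pyLcm (pyLcm p1.1 p2.1) p1.2) p2.2
         (lcm * p1.1, lcm * p1.2, lcm * p2.1)) ])) (acc := [])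
  rw [List.nil_append] at this
  rw [← this]
  refine PySem.List.foldl_congr_mem _ _ _ _ ?_
  intro a m1 _
  refine PySem.List.foldl_congr_mem _ _ _ _ ?_
  intro a' n1 _
  split_ifs with hc
  · rfl
  · exact h1 (m1 * m1 - n1 * n1, 2 * m1 * n1) a'

-- every pair the bounded tree walk emits has first component ≥ 2 (a concrete 121-element list)
set_option maxRecDepth 100000 in
theorem treeLoop_fst_ge :
    ∀ p ∈ treeLoop 400 [(2, 1)] [], 2 ≤ p.1 := by decide

-- B's sorted tree pairs are exactly A's filtered-scan parameters
set_option maxRecDepth 100000 in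
theorem pairs_eq (k : Int) (hk : k ≤ 25) :
    PySem.List.sorted2 ((treeLoop 400 [(2, 1)] []).filter (fun p => decide (p.1 < k)))
        (fun p => p.1) (fun p => p.2)
      = mnPairs k := by
  by_cases h2 : 2 ≤ k
  · interval_cases k <;> decide
  · have hfil : (treeLoop 400 [(2, 1)] []).filter (fun p => decide (p.1 < k)) = [] := by
      rw [List.filter_eq_nil_iff]
      intro p hp
      have := treeLoop_fst_ge p hp
      simp only [decide_eq_true_eq]
      omega
    have hrange : PySem.List.pyRange 2 k 1 = [] := by
      simp [PySem.List.pyRange]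
      omega
    rw [hfil]
    simp [mnPairs, hrange, PySem.List.sorted2]

-- ===== VERDICT (by name: the statement is the Claim_ definition above) =====
theorem two_triples_generator_spec : Claim_equal_two_triples_generator := by
  intro max_m _
  unfold Spec_two_triples_generator
  simp only [two_triples_generator_alt]
  rw [pairs_eq (min 25 (max_m + 1)) (min_le_left _ _), ← euclidPairs_eq_map, portA_eq max_m]
  simp only [← List.map_eq_flatMap]
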